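-- pv_equiv track=rewrite | github.com/boamiyel/py_skillbox | buns/mod4/task1.py | check_num
-- ===== SOURCE A (Python) =====
-- def check_num(nums):
--     numbers = nums.split()
--     numbers = [int(i) for i in numbers]
--
--     if all(i == numbers[0] for i in numbers):
--         return 'Все числа одинаковые'
--     if len(numbers) == len(set(numbers)):
--         return 'Все числа разные'
--     return 'Есть равные и неравные числа'
-- ===== SOURCE B (Python) =====
-- def check_num(nums):
--     numbers = sorted(int(tok) for tok in nums.split())
--     eq = [a == b for a, b in zip(numbers, numbers[1:])]
--     if all(eq):
--         return 'Все числа одинаковые'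
--     if not any(eq):
--         return 'Все числа разные'
--     return 'Есть равные и неравные числа'
-- ===== Notes on version B (the rewrite author's own statement) =====
-- stated objective: alternative
-- what changed: B sorts the parsed numbers and classifies solely from adjacent-pair equalities of the sorted list (all adjacent pairs equal = all same, no adjacent pair equal = all distinct, else mixed), replacing A's compare-to-first scan and set construction.
import Mathlib
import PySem

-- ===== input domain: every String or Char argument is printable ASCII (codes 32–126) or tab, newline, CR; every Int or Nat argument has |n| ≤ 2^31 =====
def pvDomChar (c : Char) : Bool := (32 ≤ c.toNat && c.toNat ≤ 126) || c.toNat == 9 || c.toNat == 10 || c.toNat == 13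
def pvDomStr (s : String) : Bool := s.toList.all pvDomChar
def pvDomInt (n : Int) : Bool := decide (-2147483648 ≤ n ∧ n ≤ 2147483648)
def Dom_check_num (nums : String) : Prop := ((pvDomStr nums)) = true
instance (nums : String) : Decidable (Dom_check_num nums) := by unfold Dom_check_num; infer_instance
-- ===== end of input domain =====

-- B sorts the parsed numbers and classifies from adjacent-pair equalities of the sorted list instead of A's compare-to-first scan plus set test; objective: alternative.


-- ===== PORT A =====
-- A: numbers = [int(i) for i in nums.split()]; all(i == numbers[0] …) (lazy: numbers[0]
-- never evaluated on an empty list, so the empty list takes the first branch); then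
-- len(numbers) == len(set(numbers)).
def check_num (nums : String) : String :=
  match ((PySem.Str.split₀ nums).mapM PySem.Int.ofStr?) with
  | none => ""  -- int() raises ValueError here; excluded by Pre_check_num
  | some numbers =>
    if numbers.all (fun i => i == numbers.headD 0) then
      "Все числа одинаковые"
    else if numbers.length == (PySem.Set.ofList numbers).length then
      "Все числа разные"
    else
      "Есть равные и неравные числа"

-- ===== PORT B =====
-- B: numbers = sorted(parsed); eq = [a == b for a, b in zip(numbers, numbers[1:])];
-- all(eq) → same, not any(eq) → distinct, else mixed.  (numbers[1:] = numbers.drop 1,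
-- exact for a list; zip truncates to the shorter list exactly as Python's zip.)
def check_num_alt (nums : String) : String :=
  match ((PySem.Str.split₀ nums).mapM PySem.Int.ofStr?) with
  | none => ""  -- int() raises ValueError here; excluded by Pre_check_num
  | some parsed =>
    let numbers := PySem.List.sorted parsed (fun x => x) false
    let eq := (numbers.zip (numbers.drop 1)).map (fun p => p.1 == p.2)
    if eq.all (fun b => b) then
      "Все числа одинаковые"
    else if !(eq.any (fun b => b)) then
      "Все числа разные"
    else
      "Есть равные и неравные числа"

-- ===== PRECONDITION & SPEC =====
-- Pre_ excludes exactly the inputs where int(token) raises ValueError.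
def Pre_check_num (nums : String) : Prop :=
  ((PySem.Str.split₀ nums).all (fun t => (PySem.Int.ofStr? t).isSome)) = true
instance (nums : String) : Decidable (Pre_check_num nums) := by unfold Pre_check_num; infer_instance
def pvWitness_check_num : String := "1 2 2"

def Spec_check_num (nums : String) (out : String) : Prop := out = check_num_alt nums
instance (nums : String) (out : String) : Decidable (Spec_check_num nums out) := by unfold Spec_check_num; infer_instance

-- ===== CLAIM =====
def Claim_equal_check_num : Prop := ∀ (nums : String), Dom_check_num nums → Pre_check_num nums → Spec_check_num nums (check_num nums)

-- ===== LEMMAS AND PROOFS =====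

-- the adjacent-equality list B builds
def adjEq (s : List Int) : List Bool := (s.zip (s.drop 1)).map (fun p => p.1 == p.2)

lemma adjEq_all_iff_chain' (s : List Int) :
    ((adjEq s).all (fun b => b) = true) ↔ s.IsChain (· = ·) := by
  induction s with
  | nil => simpa [adjEq] using List.isChain_nil
  | cons a t ih =>
    cases t with
    | nil => simpa [adjEq] using List.isChain_singleton a
    | cons b t' =>
      simp only [adjEq, List.drop_one, List.tail_cons, List.zip_cons_cons, List.map_cons,
        List.all_cons, Bool.and_eq_true, List.isChain_cons_cons, beq_iff_eq] at *
      exact and_congr Iff.rfl ih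

lemma adjEq_any_false_iff_chain' (s : List Int) :
    ((adjEq s).any (fun b => b) = false) ↔ s.IsChain (· ≠ ·) := by
  induction s with
  | nil => simpa [adjEq] using List.isChain_nil
  | cons a t ih =>
    cases t with
    | nil => simpa [adjEq] using List.isChain_singleton a
    | cons b t' =>
      simp only [adjEq, List.drop_one, List.tail_cons, List.zip_cons_cons, List.map_cons,
        List.any_cons, Bool.or_eq_false_iff, List.isChain_cons_cons, beq_eq_false_iff_ne, ne_eq] at *
      exact and_congr Iff.rfl ih

-- "all elements equal" as a two-sided membership statement
def allEq (l : List Int) : Prop := ∀ x ∈ l, ∀ y ∈ l, x = y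

lemma allEq_iff_pairwise (l : List Int) : allEq l ↔ l.Pairwise (· = ·) := by
  induction l with
  | nil => simp [allEq]
  | cons a t ih =>
    simp only [allEq, List.mem_cons, List.pairwise_cons] at *
    constructor
    · intro h
      refine ⟨fun y hy => h a (Or.inl rfl) y (Or.inr hy), ih.1 ?_⟩
      intro x hx y hy
      exact h x (Or.inr hx) y (Or.inr hy)
    · rintro ⟨ha, hp⟩ x hx y hy
      rcases hx with rfl | hx <;> rcases hy with rfl | hy
      · rfl
      · exact ha y hy
      · exact (ha x hx).symm
      · exact ih.2 hp x hx y hy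

lemma allEq_perm {l s : List Int} (h : l.Perm s) : allEq l ↔ allEq s := by
  unfold allEq
  constructor <;> intro hp x hx y hy
  · exact hp x (h.mem_iff.2 hx) y (h.mem_iff.2 hy)
  · exact hp x (h.mem_iff.1 hx) y (h.mem_iff.1 hy)

-- A's lazy all(i == numbers[0]) ↔ allEq
lemma a_cond_iff_allEq (l : List Int) :
    (l.all (fun i => i == l.headD 0) = true) ↔ allEq l := by
  cases l with
  | nil => simp [allEq]
  | cons a t =>
    simp only [List.all_eq_true, beq_iff_eq, List.headD_cons, allEq, List.mem_cons]
    constructor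
    · intro h x hx y hy
      rw [h x hx, h y hy]
    · intro h x hx
      exact h x hx a (Or.inl rfl)

-- combine Chain' ≠ with sortedness into strictness
lemma chain'_lt_of_chain'_ne_of_pairwise_le {s : List Int}
    (hne : s.IsChain (· ≠ ·)) (hle : s.Pairwise (· ≤ ·)) : s.IsChain (· < ·) := by
  induction s with
  | nil => exact List.isChain_nil
  | cons a t ih =>
    cases t with
    | nil => exact List.isChain_singleton a
    | cons b t' =>
      rw [List.isChain_cons_cons] at hne ⊢
      rw [List.pairwise_cons] at hle
      refine ⟨lt_of_le_of_ne (hle.1 b (by simp)) hne.1, ih hne.2 hle.2⟩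

lemma nodup_iff_chain'_ne {s : List Int} (hle : s.Pairwise (· ≤ ·)) :
    s.Nodup ↔ s.IsChain (· ≠ ·) := by
  constructor
  · intro h
    exact List.Pairwise.isChain h
  · intro h
    have hlt : s.Pairwise (· < ·) :=
      (List.isChain_iff_pairwise).1 (chain'_lt_of_chain'_ne_of_pairwise_le h hle)
    exact hlt.imp (fun hab => ne_of_lt hab)

-- foldl Set.add appends a sublist of the scanned list
lemma foldl_add_sublist (l : List Int) : ∀ s : PySem.Set Int,
    ∃ u, l.foldl PySem.Set.add s = s ++ u ∧ u.Sublist l := by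
  induction l with
  | nil => intro s; exact ⟨[], by simp, List.nil_sublist _⟩
  | cons a t ih =>
    intro s
    rcases ih (PySem.Set.add s a) with ⟨u, hu, hsub⟩
    by_cases hmem : a ∈ s
    · refine ⟨u, ?_, hsub.cons a⟩
      simpa [PySem.Set.add, hmem] using hu
    · refine ⟨a :: u, ?_, hsub.cons₂ a⟩
      simp only [List.foldl_cons, hu]
      simp [PySem.Set.add, hmem]

lemma ofList_sublist (l : List Int) : (PySem.Set.ofList l).Sublist l := by
  rcases foldl_add_sublist l [] with ⟨u, hu, hsub⟩
  rw [PySem.Set.ofList_eq_foldl, hu]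
  simpa using hsub

-- A's set-size test ↔ Nodup
lemma len_ofList_eq_iff_nodup (l : List Int) :
    (l.length = (PySem.Set.ofList l).length) ↔ l.Nodup := by
  constructor
  · intro h
    have := (ofList_sublist l).eq_of_length h.symm
    rw [← this]
    exact PySem.Set.nodup_ofList l
  · intro h
    rw [PySem.Set.ofList_eq_self_of_nodup l h]

-- ===== VERDICT =====
theorem check_num_spec : Claim_equal_check_num := by
  intro nums _ _
  unfold Spec_check_num check_num check_num_alt
  cases h : ((PySem.Str.split₀ nums).mapM PySem.Int.ofStr?) with
  | none => rfl
  | some l =>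
    have hperm : (PySem.List.sorted l (fun x => x) false).Perm l := PySem.List.sorted_perm l _ _
    have hle : (PySem.List.sorted l (fun x => x) false).Pairwise (· ≤ ·) := by
      simpa using PySem.List.sorted_pairwise l (fun x => x)
    -- first branches equivalent
    have h1 : (l.all (fun i => i == l.headD 0) = true)
        ↔ ((adjEq (PySem.List.sorted l (fun x => x) false)).all (fun b => b) = true) := by
      rw [a_cond_iff_allEq, adjEq_all_iff_chain', allEq_perm hperm.symm, allEq_iff_pairwise,
        List.isChain_iff_pairwise]
    -- second branches equivalent
    have h2 : (l.length = (PySem.Set.ofList l).length)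
        ↔ ((adjEq (PySem.List.sorted l (fun x => x) false)).any (fun b => b) = false) := by
      rw [len_ofList_eq_iff_nodup, adjEq_any_false_iff_chain', ← nodup_iff_chain'_ne hle,
        hperm.nodup_iff]
    simp only [adjEq, List.drop_one] at h1 h2
    dsimp only
    simp only [List.drop_one]
    by_cases c1 : l.all (fun i => i == l.headD 0) = true
    · rw [if_pos c1, if_pos (h1.1 c1)]
    · rw [if_neg c1, if_neg (fun hc => c1 (h1.2 hc))]
      by_cases c2 : l.length = (PySem.Set.ofList l).length
      · rw [if_pos (by simpa using c2), if_pos (by rw [h2.1 c2]; rfl)]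
      · rw [if_neg (by simpa using c2), if_neg (by
          rw [Bool.not_eq_true']
          exact fun hc => c2 (h2.2 hc))]
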